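/- GENERATED by farm/mkstatement.py from design/units.tsv (unit `DGifSlurp.5`) and the assertions of Gif/Spec/Seg_DGifSlurp.lean — do not edit.
   THE STATEMENT of the proof unit `DGifSlurp.5`: segment 5 of `DGifSlurp` (20 instructions; entries 0x10a777;
   exits 0x10a7bd,0x10a948,0x10a8ed; ranges 0x10a777-0x10a7bd,0x10a923-0x10a932,0x10a942-0x10a948)
   takes each of its entry assertions to one of its exit assertions (`Gif.Spec.DGifSlurp.Seg5`), given the contracts of its callees.
   What the names mean: ProgX/Base/Spec/Basic.lean (the shared hypotheses), Gif/Spec/Seg_DGifSlurp.lean (the assertions). The theorem to prove: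
   `theorem DGifSlurp_5_ok : Gif.Spec.DGifSlurp_5.Statement`. -/
import Gif.Code
import Gif.Dec.All
import Gif.Labels
import Gif.Spec.Alloc
import Gif.Spec.Seg_DGifSlurp
import Gif.Spec.Slurp
namespace Gif.Spec.DGifSlurp_5
open X86 X86.User Asan

/-- The statement of unit `DGifSlurp.5`. -/
def Statement : Prop :=
  ∀ (Lay : Layout) (_hLay : Lay.hi = 0x1000000) (μ : Microarch) (_hμ : UserX.MicroOK μ) (u₀ : State)
    (_hcode : HasCodeNat Lay u₀ Gif.L.DGifSlurp.entry Gif.Code.code_DGifSlurp.nat Gif.L.DGifSlurp.size)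
    (_h_openbsd_reallocarray : ∀ (H : Heap) (rest : List Obj) (frames : List (Nat × FrameLayout)) (n c : Nat), Calls Lay μ ProgX.Base.WayInv (ProgX.Base.conv u₀) Gif.L.openbsd_reallocarray.entry (Gif.Spec.openbsd_reallocarray.spec H rest frames n c))
    (_h_asan_store8_noabort : Asan.SmallCheck Lay μ ProgX.Base.WayInv (ProgX.Base.CodeOK u₀) [.rax, .rcx, .rdx] 8 ProgX.Base.L.__asan_store8_noabort.entry)
    (_h_asan_load1_noabort : Asan.SmallCheck Lay μ ProgX.Base.WayInv (ProgX.Base.CodeOK u₀) [.rax, .rdx] 1 ProgX.Base.L.__asan_load1_noabort.entry)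
    (_h_DGifDecreaseImageCounter : ∀ (H : Heap) (rest : List Obj) (frames : List (Nat × FrameLayout)) (F : Forest) (R : Rd) (init : List Img) (g : Img), Calls Lay μ ProgX.Base.WayInv (ProgX.Base.conv u₀) Gif.L.DGifDecreaseImageCounter.entry (Gif.Spec.DGifDecreaseImageCounter.spec H rest frames F R init g)),
    Gif.Spec.DGifSlurp.Seg5 Lay μ u₀

end Gif.Spec.DGifSlurp_5
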